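-- pv_equiv track=rewrite | github.com/akeita05/hvlcs | src/hvlcs.py | hvlcs
-- ===== SOURCE A (Python) =====
-- def hvlcs(A, B, values):
--     """
--     compute the highest value common subsequence of A and B.
--
--     recurrence:
--       Let dp[i][j] = max value of a common subsequence of A[0..i-1] and B[0..j-1].
--
--       base cases:
--         dp[0][j] = 0  for all j  (empty prefix of A -> no common subsequence)
--         dp[i][0] = 0  for all i  (empty prefix of B -> no common subsequence)
--
--       recurrence (for i >= 1, j >= 1):
--         If A[i-1] == B[j-1]:
--           dp[i][j] = dp[i-1][j-1] + v(A[i-1])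
--             - we can always extend a common subsequence by the matching character;
--                since v >= 0, this is always as good as not taking it at all.
--             - we also compare with dp[i-1][j] and dp[i][j-1] in case
--                skipping this match (and using a different alignment) is better.
--           dp[i][j] = max(dp[i-1][j-1] + v(A[i-1]), dp[i-1][j], dp[i][j-1])
--         Else:
--           dp[i][j] = max(dp[i-1][j], dp[i][j-1])
--
--     runtime: O(m * n) where m = |A|, n = |B|.
--     """
--     m, n = len(A), len(B)
--
--     #build dp table
--     dp = [[0] * (n + 1) for _ in range(m + 1)]
--
--     for i in range(1, m + 1):
--         for j in range(1, n + 1):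
--             if A[i - 1] == B[j - 1]:
--                 char_val = values.get(A[i - 1], 0)
--                 take = dp[i - 1][j - 1] + char_val
--                 dp[i][j] = max(take, dp[i - 1][j], dp[i][j - 1])
--             else:
--                 dp[i][j] = max(dp[i - 1][j], dp[i][j - 1])
--
--     #reconstruct the optimal subsequence
--     seq = []
--     i, j = m, n
--     while i > 0 and j > 0:
--         if A[i - 1] == B[j - 1]:
--             char_val = values.get(A[i - 1], 0)
--             take = dp[i - 1][j - 1] + char_val
--             if dp[i][j] == take and dp[i][j] >= dp[i - 1][j] and dp[i][j] >= dp[i][j - 1]: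
--                 seq.append(A[i - 1])
--                 i -= 1
--                 j -= 1
--             elif dp[i][j] == dp[i - 1][j]:
--                 i -= 1
--             else:
--                 j -= 1
--         elif dp[i - 1][j] >= dp[i][j - 1]:
--             i -= 1
--         else:
--             j -= 1
--
--     seq.reverse()
--     return dp[m][n], ''.join(seq)
-- ===== SOURCE B (Python) =====
-- def hvlcs(A, B, values):
--     """Single forward pass over rolling rows carrying (value, subsequence) pairs,
--     the subsequence stored as a shared backward-linked chain (char, parent);
--     each cell resolves A's tie-break rule forward, so the dp table and the
--     backward trace are eliminated."""
--     prev = [(0, None)] * (len(B) + 1)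
--     for a in A:
--         cv = values.get(a, 0)
--         cur = [(0, None)]
--         for j, b in enumerate(B, 1):
--             up, left, diag = prev[j], cur[j - 1], prev[j - 1]
--             if a == b:
--                 take = diag[0] + cv
--                 v = max(take, up[0], left[0])
--                 if v == take and v >= up[0] and v >= left[0]:
--                     cur.append((v, (a, diag[1])))
--                 elif v == up[0]:
--                     cur.append((v, up[1]))
--                 else:
--                     cur.append((v, left[1]))
--             elif up[0] >= left[0]:
--                 cur.append(up)
--             else:
--                 cur.append(left)
--         prev = cur
--     val, node = prev[len(B)]
--     out = []
--     while node is not None: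
--         out.append(node[0])
--         node = node[1]
--     out.reverse()
--     return val, ''.join(out)
-- ===== Notes on version B (the rewrite author's own statement) =====
-- stated objective: alternative
-- what changed: A fills a full (m+1)x(n+1) dp table of values and then reconstructs the subsequence with a separate backward while-loop over the table; B keeps only a rolling previous/current row whose cells carry (value, subsequence) pairs with the subsequence as a shared backward-linked chain, resolving A's tie-break rule forward at each cell, so the table and the backtrace are eliminated.
import Mathlib
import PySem

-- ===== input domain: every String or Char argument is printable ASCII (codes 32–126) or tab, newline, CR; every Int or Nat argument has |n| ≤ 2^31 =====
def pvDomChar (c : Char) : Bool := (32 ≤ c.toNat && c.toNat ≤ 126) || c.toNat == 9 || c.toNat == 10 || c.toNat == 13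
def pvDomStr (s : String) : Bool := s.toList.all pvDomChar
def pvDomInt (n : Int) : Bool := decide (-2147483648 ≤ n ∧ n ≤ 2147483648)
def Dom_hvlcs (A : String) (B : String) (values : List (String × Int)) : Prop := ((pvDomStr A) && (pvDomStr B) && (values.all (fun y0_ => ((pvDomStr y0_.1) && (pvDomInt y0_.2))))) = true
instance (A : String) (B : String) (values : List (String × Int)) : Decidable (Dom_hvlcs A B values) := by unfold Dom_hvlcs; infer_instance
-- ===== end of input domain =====

-- B replaces A's dp-table-then-backtrace by a single forward pass over rolling rows that
-- carries (value, subsequence) pairs — the subsequence as a shared backward-linked chain,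
-- ported as a List Char in reverse order (Python's None-terminated (char, parent) tuples) —
-- eliminating the table and the backward reconstruction; alternative structure, not claimed faster.

-- values.get(ch, 0) — the identical expression occurring in both Python sources
def pvVget (vs : List (String × Int)) (c : Char) : Int :=
  (PySem.Dict.mk vs).getD (String.singleton c) 0

-- ===== PORT A =====
-- dp[i][j] read / write on the list-of-lists table
def pvTget (dp : List (List Int)) (i j : Nat) : Int := (dp.getD i []).getD j 0
def pvTset (dp : List (List Int)) (i j : Nat) (v : Int) : List (List Int) :=
  dp.set i ((dp.getD i []).set j v)

-- the loop body of A: fill cell (i'+1, j'+1)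
def pvStepA (As Bs : List Char) (vs : List (String × Int)) (dp : List (List Int)) (i' j' : Nat) :
    List (List Int) :=
  let a := As.getD i' ' '
  let v :=
    if a == Bs.getD j' ' ' then
      max (max (pvTget dp i' j' + pvVget vs a) (pvTget dp i' (j' + 1))) (pvTget dp (i' + 1) j')
    else
      max (pvTget dp i' (j' + 1)) (pvTget dp (i' + 1) j')
  pvTset dp (i' + 1) (j' + 1) v

-- the row-major double loop of A building the dp table
def pvRowsA (As Bs : List Char) (vs : List (String × Int)) : List (List Int) :=
  (List.range As.length).foldl (fun dp i' =>
    (List.range Bs.length).foldl (fun dp j' => pvStepA As Bs vs dp i' j') dp)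
    (List.replicate (As.length + 1) (List.replicate (Bs.length + 1) (0 : Int)))

-- A's backtrace while-loop (appends to seq, reversed at the end)
def pvBack (As Bs : List Char) (vs : List (String × Int)) (g : Nat → Nat → Int) :
    Nat → Nat → List Char → List Char
  | i, j, acc =>
    if h : 0 < i ∧ 0 < j then
      let a := As.getD (i - 1) ' '
      if a == Bs.getD (j - 1) ' ' then
        if g i j = g (i - 1) (j - 1) + pvVget vs a ∧ g (i - 1) j ≤ g i j ∧ g i (j - 1) ≤ g i j then
          pvBack As Bs vs g (i - 1) (j - 1) (acc ++ [a])
        else if g i j = g (i - 1) j then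
          pvBack As Bs vs g (i - 1) j acc
        else
          pvBack As Bs vs g i (j - 1) acc
      else if g i (j - 1) ≤ g (i - 1) j then
        pvBack As Bs vs g (i - 1) j acc
      else
        pvBack As Bs vs g i (j - 1) acc
    else acc
  termination_by i j _ => i + j
  decreasing_by all_goals omega

def hvlcs (A : String) (B : String) (values : List (String × Int)) : Int × String :=
  let As := A.toList
  let Bs := B.toList
  let dp := pvRowsA As Bs values
  (pvTget dp As.length Bs.length,
   String.ofList (pvBack As Bs values (pvTget dp) As.length Bs.length []).reverse)

-- ===== PORT B =====
-- the inner-loop body of B: given prev row, current char a and its value cv, and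
-- state (cur, j), consume the next char b of B (Python's `for j, b in enumerate(B, 1)`)
def pvInnerStepB (prev : List (Int × List Char)) (cv : Int) (a : Char)
    (st : List (Int × List Char) × Nat) (b : Char) : List (Int × List Char) × Nat :=
  let cur := st.1
  let j := st.2
  let up := prev.getD j (0, [])
  let left := cur.getD (j - 1) (0, [])
  let diag := prev.getD (j - 1) (0, [])
  if a == b then
    let take := diag.1 + cv
    let v := max (max take up.1) left.1
    if v = take ∧ up.1 ≤ v ∧ left.1 ≤ v then (cur ++ [(v, a :: diag.2)], j + 1)
    else if v = up.1 then (cur ++ [(v, up.2)], j + 1)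
    else (cur ++ [(v, left.2)], j + 1)
  else if left.1 ≤ up.1 then (cur ++ [up], j + 1)
  else (cur ++ [left], j + 1)

-- one iteration of B's outer loop: build the next row from prev for character a
def pvRowB (Bs : List Char) (vs : List (String × Int)) (prev : List (Int × List Char)) (a : Char) :
    List (Int × List Char) :=
  (Bs.foldl (pvInnerStepB prev (pvVget vs a) a) ([(0, [])], 1)).1

def hvlcs_alt (A : String) (B : String) (values : List (String × Int)) : Int × String :=
  let As := A.toList
  let Bs := B.toList
  let prev := As.foldl (pvRowB Bs values) (List.replicate (Bs.length + 1) ((0 : Int), ([] : List Char)))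
  let cell := prev.getD Bs.length (0, [])
  -- Python walks the (char, parent) chain head-to-parent and reverses: that is cell.2.reverse
  (cell.1, String.ofList cell.2.reverse)

-- ===== PRECONDITION & SPEC =====
def Spec_hvlcs (A : String) (B : String) (values : List (String × Int)) (out : Int × String) : Prop := out = hvlcs_alt A B values
instance (A : String) (B : String) (values : List (String × Int)) (out : Int × String) : Decidable (Spec_hvlcs A B values out) := by unfold Spec_hvlcs; infer_instance

-- ===== CLAIM (what is proved, stated in full; the proofs are below) =====
def Claim_equal_hvlcs : Prop := ∀ (A : String) (B : String) (values : List (String × Int)), Dom_hvlcs A B values → Spec_hvlcs A B values (hvlcs A B values)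

-- ===== LEMMAS AND PROOFS =====

-- the common value recurrence dp[i][j]
def pvDpS (As Bs : List Char) (vs : List (String × Int)) : Nat → Nat → Int
  | 0, _ => 0
  | _ + 1, 0 => 0
  | i + 1, j + 1 =>
    let a := As.getD i ' '
    if a == Bs.getD j ' ' then
      max (max (pvDpS As Bs vs i j + pvVget vs a) (pvDpS As Bs vs i (j + 1))) (pvDpS As Bs vs (i + 1) j)
    else
      max (pvDpS As Bs vs i (j + 1)) (pvDpS As Bs vs (i + 1) j)
  termination_by i j => (i, j)

-- the subsequence the tie-break rule selects at cell (i, j)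
def pvStr (As Bs : List Char) (vs : List (String × Int)) : Nat → Nat → List Char
  | 0, _ => []
  | _ + 1, 0 => []
  | i + 1, j + 1 =>
    let a := As.getD i ' '
    if a == Bs.getD j ' ' then
      let take := pvDpS As Bs vs i j + pvVget vs a
      let v := pvDpS As Bs vs (i + 1) (j + 1)
      if v = take ∧ pvDpS As Bs vs i (j + 1) ≤ v ∧ pvDpS As Bs vs (i + 1) j ≤ v then
        pvStr As Bs vs i j ++ [a]
      else if v = pvDpS As Bs vs i (j + 1) then pvStr As Bs vs i (j + 1)
      else pvStr As Bs vs (i + 1) j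
    else if pvDpS As Bs vs (i + 1) j ≤ pvDpS As Bs vs i (j + 1) then pvStr As Bs vs i (j + 1)
    else pvStr As Bs vs (i + 1) j
  termination_by i j => (i, j)

-- the table both loops compute, extended by 0 outside the index range
def pvE (As Bs : List Char) (vs : List (String × Int)) (i j : Nat) : Int :=
  if i ≤ As.length ∧ j ≤ Bs.length then pvDpS As Bs vs i j else 0

theorem pvDpS_zero_left (As Bs : List Char) (vs : List (String × Int)) (j : Nat) :
    pvDpS As Bs vs 0 j = 0 := by simp [pvDpS]

theorem pvDpS_zero_right (As Bs : List Char) (vs : List (String × Int)) (i : Nat) :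
    pvDpS As Bs vs i 0 = 0 := by cases i <;> simp [pvDpS]

theorem pvStr_zero_left (As Bs : List Char) (vs : List (String × Int)) (j : Nat) :
    pvStr As Bs vs 0 j = [] := by simp [pvStr]

theorem pvStr_zero_right (As Bs : List Char) (vs : List (String × Int)) (i : Nat) :
    pvStr As Bs vs i 0 = [] := by cases i <;> simp [pvStr]

theorem pvLen_tset (dp : List (List Int)) (i j : Nat) (v : Int) :
    (pvTset dp i j v).length = dp.length := by simp [pvTset]

theorem pvRow_tset (dp : List (List Int)) (i j : Nat) (v : Int) (i' : Nat) :
    (pvTset dp i j v).getD i' [] =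
      if i' = i ∧ i < dp.length then (dp.getD i []).set j v else dp.getD i' [] := by
  simp only [pvTset, List.getD, List.getElem?_set]
  split_ifs with h1 h2 h3 h4 <;> simp_all

theorem pvTget_tset (dp : List (List Int)) (i j : Nat) (v : Int) (i' j' : Nat)
    (hi : i < dp.length) (hj : j < (dp.getD i []).length) :
    pvTget (pvTset dp i j v) i' j' = if i' = i ∧ j' = j then v else pvTget dp i' j' := by
  unfold pvTget
  rw [pvRow_tset]
  by_cases h1 : i' = i
  · subst h1
    rw [if_pos ⟨rfl, hi⟩]
    simp only [List.getD] at hj ⊢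
    rw [List.getElem?_set]
    by_cases h2 : j = j'
    · subst h2
      simp [hj]
    · rw [if_neg h2, if_neg (by omega)]
  · rw [if_neg (by simp [h1]), if_neg (by simp [h1])]

-- the inner (column) loop of A, starting from a table whose rows 0..r are final
theorem pvInnerA (As Bs : List Char) (vs : List (String × Int)) (r : Nat) (hr : r < As.length)
    (dp0 : List (List Int))
    (h0len : dp0.length = As.length + 1)
    (h0row : ∀ i, i ≤ As.length → (dp0.getD i []).length = Bs.length + 1)
    (h0v : ∀ i j, pvTget dp0 i j = if i ≤ r then pvE As Bs vs i j else 0) :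
    ∀ c, c ≤ Bs.length →
      ((List.range c).foldl (fun dp j' => pvStepA As Bs vs dp r j') dp0).length = As.length + 1 ∧
      (∀ i, i ≤ As.length →
        (((List.range c).foldl (fun dp j' => pvStepA As Bs vs dp r j') dp0).getD i []).length = Bs.length + 1) ∧
      (∀ i j, pvTget ((List.range c).foldl (fun dp j' => pvStepA As Bs vs dp r j') dp0) i j =
        if i ≤ r ∨ (i = r + 1 ∧ 1 ≤ j ∧ j ≤ c) then pvE As Bs vs i j else 0) := by
  intro c
  induction c with
  | zero =>
    intro _
    simp only [List.range_zero, List.foldl_nil]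
    refine ⟨h0len, h0row, ?_⟩
    intro i j
    rw [h0v]
    congr 1
    simp only [eq_iff_iff]
    omega
  | succ c ih =>
    intro hc
    obtain ⟨ihlen, ihrow, ihv⟩ := ih (by omega)
    rw [List.range_succ, List.foldl_append, List.foldl_cons, List.foldl_nil]
    set dp := (List.range c).foldl (fun dp j' => pvStepA As Bs vs dp r j') dp0 with hdp
    have hrlen : (dp.getD (r + 1) []).length = Bs.length + 1 := ihrow (r + 1) (by omega)
    have hi1 : r + 1 < dp.length := by omega
    have hj1 : c + 1 < (dp.getD (r + 1) []).length := by omega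
    -- the three reads are pvE values
    have hread1 : pvTget dp r c = pvE As Bs vs r c := by rw [ihv]; simp
    have hread2 : pvTget dp r (c + 1) = pvE As Bs vs r (c + 1) := by rw [ihv]; simp
    have hread3 : pvTget dp (r + 1) c = pvE As Bs vs (r + 1) c := by
      rw [ihv]
      by_cases h : 1 ≤ c
      · rw [if_pos (by omega)]
      · have hc0 : c = 0 := by omega
        subst hc0
        rw [if_neg (by omega)]
        unfold pvE
        rw [if_pos ⟨by omega, by omega⟩, pvDpS_zero_right]
    -- the written value is pvE (r+1) (c+1)
    have hval : pvE As Bs vs (r + 1) (c + 1) =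
        (if As.getD r ' ' == Bs.getD c ' ' then
          max (max (pvTget dp r c + pvVget vs (As.getD r ' ')) (pvTget dp r (c + 1))) (pvTget dp (r + 1) c)
        else max (pvTget dp r (c + 1)) (pvTget dp (r + 1) c)) := by
      have h1 : r + 1 ≤ As.length := by omega
      have h2 : c + 1 ≤ Bs.length := hc
      have e1 : pvE As Bs vs r c = pvDpS As Bs vs r c := by
        unfold pvE; rw [if_pos ⟨by omega, by omega⟩]
      have e2 : pvE As Bs vs r (c + 1) = pvDpS As Bs vs r (c + 1) := by
        unfold pvE; rw [if_pos ⟨by omega, by omega⟩]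
      have e3 : pvE As Bs vs (r + 1) c = pvDpS As Bs vs (r + 1) c := by
        unfold pvE; rw [if_pos ⟨by omega, by omega⟩]
      rw [hread1, hread2, hread3, e1, e2, e3]
      unfold pvE
      rw [if_pos ⟨h1, h2⟩]
      simp only [pvDpS]
    refine ⟨?_, ?_, ?_⟩
    · rw [pvStepA, pvLen_tset]; exact ihlen
    · intro i hi
      simp only [pvStepA, pvRow_tset]
      by_cases h : i = r + 1
      · rw [if_pos ⟨h, hi1⟩]
        simp only [List.length_set]
        exact ihrow (r + 1) (by omega)
      · rw [if_neg (by tauto)]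
        exact ihrow i hi
    · intro i j
      simp only [pvStepA]
      rw [pvTget_tset dp (r + 1) (c + 1) _ i j hi1 hj1]
      by_cases h : i = r + 1 ∧ j = c + 1
      · obtain ⟨hi', hj'⟩ := h
        subst hi' hj'
        rw [if_pos ⟨rfl, rfl⟩, ← hval, if_pos (by omega)]
      · rw [if_neg h, ihv]
        congr 1
        simp only [eq_iff_iff]
        omega

-- the outer (row) loop of A
theorem pvOuterA (As Bs : List Char) (vs : List (String × Int)) :
    ∀ r, r ≤ As.length →
      ((List.range r).foldl (fun dp i' =>
          (List.range Bs.length).foldl (fun dp j' => pvStepA As Bs vs dp i' j') dp)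
        (List.replicate (As.length + 1) (List.replicate (Bs.length + 1) (0 : Int)))).length
          = As.length + 1 ∧
      (∀ i, i ≤ As.length →
        (((List.range r).foldl (fun dp i' =>
            (List.range Bs.length).foldl (fun dp j' => pvStepA As Bs vs dp i' j') dp)
          (List.replicate (As.length + 1) (List.replicate (Bs.length + 1) (0 : Int)))).getD i []).length
            = Bs.length + 1) ∧
      (∀ i j, pvTget ((List.range r).foldl (fun dp i' =>
          (List.range Bs.length).foldl (fun dp j' => pvStepA As Bs vs dp i' j') dp)
        (List.replicate (As.length + 1) (List.replicate (Bs.length + 1) (0 : Int)))) i j =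
        if i ≤ r then pvE As Bs vs i j else 0) := by
  intro r
  induction r with
  | zero =>
    intro _
    simp only [List.range_zero, List.foldl_nil]
    refine ⟨by simp, ?_, ?_⟩
    · intro i hi
      rw [List.getD_replicate _ (by omega)]
      simp
    · intro i j
      unfold pvTget
      have hz : ((List.replicate (As.length + 1) (List.replicate (Bs.length + 1) (0 : Int))).getD i []).getD j 0 = 0 := by
        by_cases hi : i < As.length + 1
        · rw [List.getD_replicate _ hi]
          by_cases hj : j < Bs.length + 1
          · rw [List.getD_replicate _ hj]
          · rw [List.getD_eq_default _ _ (by simp only [List.length_replicate]; omega)]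
        · rw [show (List.replicate (As.length + 1) (List.replicate (Bs.length + 1) (0 : Int))).getD i [] = [] from
            List.getD_eq_default _ _ (by simp only [List.length_replicate]; omega)]
          simp
      rw [hz]
      split_ifs with h
      · have : i = 0 := by omega
        subst this
        unfold pvE
        rw [pvDpS_zero_left]
        split_ifs <;> rfl
      · rfl
  | succ r ih =>
    intro hr
    obtain ⟨ihlen, ihrow, ihv⟩ := ih (by omega)
    rw [List.range_succ, List.foldl_append, List.foldl_cons, List.foldl_nil]
    have hv0 : ∀ i j, pvTget ((List.range r).foldl (fun dp i' =>
        (List.range Bs.length).foldl (fun dp j' => pvStepA As Bs vs dp i' j') dp)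
      (List.replicate (As.length + 1) (List.replicate (Bs.length + 1) (0 : Int)))) i j =
        if i ≤ r then pvE As Bs vs i j else 0 := ihv
    obtain ⟨len', row', v'⟩ := pvInnerA As Bs vs r (by omega) _ ihlen ihrow hv0 Bs.length (le_refl _)
    refine ⟨len', row', ?_⟩
    intro i j
    rw [v']
    by_cases h1 : i ≤ r + 1
    · by_cases h2 : i ≤ r
      · rw [if_pos (by omega), if_pos h1]
      · have hir : i = r + 1 := by omega
        subst hir
        by_cases h3 : 1 ≤ j ∧ j ≤ Bs.length
        · rw [if_pos (by omega), if_pos h1]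
        · rw [if_neg (by omega), if_pos h1]
          unfold pvE
          by_cases hj0 : j = 0
          · subst hj0
            rw [if_pos ⟨by omega, by omega⟩, pvDpS_zero_right]
          · rw [if_neg (by omega)]
    · rw [if_neg (by omega), if_neg (by omega)]

theorem pvTgetA_eq (As Bs : List Char) (vs : List (String × Int)) (i j : Nat) :
    pvTget (pvRowsA As Bs vs) i j = pvE As Bs vs i j := by
  obtain ⟨-, -, hv⟩ := pvOuterA As Bs vs As.length (le_refl _)
  unfold pvRowsA
  rw [hv]
  split_ifs with h
  · rfl
  · simp only [pvE]
    split_ifs <;> first | rfl | omega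

-- the row of (value, reversed string) pairs B's invariant says it maintains
def pvRowSpec (As Bs : List Char) (vs : List (String × Int)) (i t : Nat) : List (Int × List Char) :=
  (List.range t).map (fun j => (pvDpS As Bs vs i j, (pvStr As Bs vs i j).reverse))

theorem pvRowSpec_getD (As Bs : List Char) (vs : List (String × Int)) (i t j : Nat) (hj : j < t) :
    (pvRowSpec As Bs vs i t).getD j (0, []) = (pvDpS As Bs vs i j, (pvStr As Bs vs i j).reverse) := by
  unfold pvRowSpec
  rw [List.getD_eq_getElem _ _ (by simpa using hj)]
  simp

-- B's inner loop over the first t characters of B maintains pvRowSpec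
theorem pvInnerB (As Bs : List Char) (vs : List (String × Int)) (i : Nat) :
    ∀ t, t ≤ Bs.length →
      (Bs.take t).foldl
          (pvInnerStepB (pvRowSpec As Bs vs i (Bs.length + 1)) (pvVget vs (As.getD i ' ')) (As.getD i ' '))
          ([(0, [])], 1)
        = (pvRowSpec As Bs vs (i + 1) (t + 1), t + 1) := by
  intro t
  induction t with
  | zero =>
    intro _
    simp only [List.take_zero, List.foldl_nil]
    unfold pvRowSpec
    simp [pvDpS_zero_right, pvStr_zero_right]
  | succ t ih =>
    intro ht
    have hb : Bs.take (t + 1) = Bs.take t ++ [Bs.getD t ' '] := by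
      rw [List.getD_eq_getElem _ _ (by omega)]
      exact List.take_succ_eq_append_getElem (by omega)
    rw [hb, List.foldl_append, List.foldl_cons, List.foldl_nil, ih (by omega)]
    set a := As.getD i ' ' with ha
    -- reads
    have hup : (pvRowSpec As Bs vs i (Bs.length + 1)).getD (t + 1) (0, [])
        = (pvDpS As Bs vs i (t + 1), (pvStr As Bs vs i (t + 1)).reverse) :=
      pvRowSpec_getD _ _ _ _ _ _ (by omega)
    have hdiag : (pvRowSpec As Bs vs i (Bs.length + 1)).getD t (0, [])
        = (pvDpS As Bs vs i t, (pvStr As Bs vs i t).reverse) :=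
      pvRowSpec_getD _ _ _ _ _ _ (by omega)
    have hleft : (pvRowSpec As Bs vs (i + 1) (t + 1)).getD t (0, [])
        = (pvDpS As Bs vs (i + 1) t, (pvStr As Bs vs (i + 1) t).reverse) :=
      pvRowSpec_getD _ _ _ _ _ _ (by omega)
    have hrs : pvRowSpec As Bs vs (i + 1) (t + 1 + 1)
        = pvRowSpec As Bs vs (i + 1) (t + 1)
          ++ [(pvDpS As Bs vs (i + 1) (t + 1), (pvStr As Bs vs (i + 1) (t + 1)).reverse)] := by
      unfold pvRowSpec
      rw [List.range_succ, List.map_append]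
      simp
    simp only [pvInnerStepB, Nat.add_sub_cancel, hup, hdiag, hleft]
    rw [hrs]
    by_cases hm : a == Bs.getD t ' '
    · rw [if_pos hm]
      have hv : max (max (pvDpS As Bs vs i t + pvVget vs a) (pvDpS As Bs vs i (t + 1)))
          (pvDpS As Bs vs (i + 1) t) = pvDpS As Bs vs (i + 1) (t + 1) := by
        conv_rhs => rw [pvDpS]
        rw [← ha, if_pos hm]
      rw [hv]
      have hs : pvStr As Bs vs (i + 1) (t + 1) =
          if pvDpS As Bs vs (i + 1) (t + 1) = pvDpS As Bs vs i t + pvVget vs a ∧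
              pvDpS As Bs vs i (t + 1) ≤ pvDpS As Bs vs (i + 1) (t + 1) ∧
              pvDpS As Bs vs (i + 1) t ≤ pvDpS As Bs vs (i + 1) (t + 1) then
            pvStr As Bs vs i t ++ [a]
          else if pvDpS As Bs vs (i + 1) (t + 1) = pvDpS As Bs vs i (t + 1) then
            pvStr As Bs vs i (t + 1)
          else pvStr As Bs vs (i + 1) t := by
        conv_lhs => rw [pvStr]
        rw [← ha, if_pos hm]
      rw [hs]
      split_ifs <;> simp
    · rw [if_neg hm]
      have hv : pvDpS As Bs vs (i + 1) (t + 1)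
          = max (pvDpS As Bs vs i (t + 1)) (pvDpS As Bs vs (i + 1) t) := by
        conv_lhs => rw [pvDpS]
        rw [← ha, if_neg hm]
      have hs : pvStr As Bs vs (i + 1) (t + 1) =
          if pvDpS As Bs vs (i + 1) t ≤ pvDpS As Bs vs i (t + 1) then pvStr As Bs vs i (t + 1)
          else pvStr As Bs vs (i + 1) t := by
        conv_lhs => rw [pvStr]
        rw [← ha, if_neg hm]
      by_cases hc : pvDpS As Bs vs (i + 1) t ≤ pvDpS As Bs vs i (t + 1)
      · rw [if_pos hc]
        rw [hs, if_pos hc]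
        have : pvDpS As Bs vs i (t + 1) = pvDpS As Bs vs (i + 1) (t + 1) := by omega
        rw [this]
      · rw [if_neg hc]
        rw [hs, if_neg hc]
        have : pvDpS As Bs vs (i + 1) t = pvDpS As Bs vs (i + 1) (t + 1) := by omega
        rw [this]

-- B's outer loop over the first k characters of A produces row k
theorem pvOuterB (As Bs : List Char) (vs : List (String × Int)) :
    ∀ k, k ≤ As.length →
      (As.take k).foldl (pvRowB Bs vs) (List.replicate (Bs.length + 1) ((0 : Int), ([] : List Char)))
        = pvRowSpec As Bs vs k (Bs.length + 1) := by
  intro k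
  induction k with
  | zero =>
    intro _
    simp only [List.take_zero, List.foldl_nil]
    unfold pvRowSpec
    apply List.ext_getElem
    · simp
    · intro n h1 h2
      simp [pvDpS_zero_left, pvStr_zero_left]
  | succ k ih =>
    intro hk
    have hb : As.take (k + 1) = As.take k ++ [As.getD k ' '] := by
      rw [List.getD_eq_getElem _ _ (by omega)]
      exact List.take_succ_eq_append_getElem (by omega)
    rw [hb, List.foldl_append, List.foldl_cons, List.foldl_nil, ih (by omega)]
    unfold pvRowB
    rw [show Bs.foldl
        (pvInnerStepB (pvRowSpec As Bs vs k (Bs.length + 1)) (pvVget vs (As.getD k ' ')) (As.getD k ' '))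
        ([(0, [])], 1)
      = (pvRowSpec As Bs vs (k + 1) (Bs.length + 1), Bs.length + 1) from by
        have := pvInnerB As Bs vs k Bs.length (le_refl _)
        rwa [List.take_length] at this]

-- the backtrace from (i, j) reading pvE collects pvStr i j (reversed onto acc)
theorem pvBack_eq (As Bs : List Char) (vs : List (String × Int)) :
    ∀ n i j acc, i + j = n → i ≤ As.length → j ≤ Bs.length →
      pvBack As Bs vs (pvE As Bs vs) i j acc = acc ++ (pvStr As Bs vs i j).reverse := by
  intro n
  induction n using Nat.strong_induction_on with
  | _ n IH =>
    intro i j acc hn hi hj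
    match i, j with
    | 0, j => rw [pvBack]; simp [pvStr_zero_left]
    | i + 1, 0 => rw [pvBack]; simp [pvStr_zero_right]
    | i + 1, j + 1 =>
      rw [pvBack]
      rw [dif_pos ⟨by omega, by omega⟩]
      simp only [Nat.add_sub_cancel]
      have e00 : pvE As Bs vs (i + 1) (j + 1) = pvDpS As Bs vs (i + 1) (j + 1) := by
        unfold pvE; rw [if_pos ⟨hi, hj⟩]
      have e10 : pvE As Bs vs i j = pvDpS As Bs vs i j := by
        unfold pvE; rw [if_pos ⟨by omega, by omega⟩]
      have e01 : pvE As Bs vs i (j + 1) = pvDpS As Bs vs i (j + 1) := by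
        unfold pvE; rw [if_pos ⟨by omega, by omega⟩]
      have e11 : pvE As Bs vs (i + 1) j = pvDpS As Bs vs (i + 1) j := by
        unfold pvE; rw [if_pos ⟨by omega, by omega⟩]
      rw [e00, e10, e01, e11]
      set a := As.getD i ' ' with ha
      by_cases hm : a == Bs.getD j ' '
      · rw [if_pos hm]
        have hstr : pvStr As Bs vs (i + 1) (j + 1) =
            if pvDpS As Bs vs (i + 1) (j + 1) = pvDpS As Bs vs i j + pvVget vs a ∧
                pvDpS As Bs vs i (j + 1) ≤ pvDpS As Bs vs (i + 1) (j + 1) ∧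
                pvDpS As Bs vs (i + 1) j ≤ pvDpS As Bs vs (i + 1) (j + 1) then
              pvStr As Bs vs i j ++ [a]
            else if pvDpS As Bs vs (i + 1) (j + 1) = pvDpS As Bs vs i (j + 1) then
              pvStr As Bs vs i (j + 1)
            else pvStr As Bs vs (i + 1) j := by
          conv_lhs => rw [pvStr]
          rw [← ha, if_pos hm]
        split_ifs with h1 h2
        · rw [IH (i + j) (by omega) i j (acc ++ [a]) rfl (by omega) (by omega),
            hstr, if_pos h1]
          simp
        · rw [IH (i + (j + 1)) (by omega) i (j + 1) acc rfl (by omega) (by omega),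
            hstr, if_neg h1, if_pos h2]
        · rw [IH ((i + 1) + j) (by omega) (i + 1) j acc rfl (by omega) (by omega),
            hstr, if_neg h1, if_neg h2]
      · rw [if_neg hm]
        have hstr : pvStr As Bs vs (i + 1) (j + 1) =
            if pvDpS As Bs vs (i + 1) j ≤ pvDpS As Bs vs i (j + 1) then pvStr As Bs vs i (j + 1)
            else pvStr As Bs vs (i + 1) j := by
          conv_lhs => rw [pvStr]
          rw [← ha, if_neg hm]
        split_ifs with h1
        · rw [IH (i + (j + 1)) (by omega) i (j + 1) acc rfl (by omega) (by omega),
            hstr, if_pos h1]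
        · rw [IH ((i + 1) + j) (by omega) (i + 1) j acc rfl (by omega) (by omega),
            hstr, if_neg h1]

-- ===== VERDICT (by name: the statement is the Claim_ definition above) =====
theorem hvlcs_spec : Claim_equal_hvlcs := by
  intro A B values _
  unfold Spec_hvlcs hvlcs hvlcs_alt
  have hout := pvOuterB A.toList B.toList values A.toList.length (le_refl _)
  rw [List.take_length] at hout
  simp only [hout]
  have hv := pvTgetA_eq A.toList B.toList values
  have hback : pvBack A.toList B.toList values (pvTget (pvRowsA A.toList B.toList values))
      A.toList.length B.toList.length [] =
      (pvStr A.toList B.toList values A.toList.length B.toList.length).reverse := by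
    have : pvTget (pvRowsA A.toList B.toList values) = pvE A.toList B.toList values := funext fun i => funext fun j => hv i j
    rw [this, pvBack_eq _ _ _ (A.toList.length + B.toList.length) _ _ [] rfl (le_refl _) (le_refl _)]
    simp
  rw [hback,
    pvRowSpec_getD A.toList B.toList values A.toList.length (B.toList.length + 1) B.toList.length (by omega)]
  have hvv : pvTget (pvRowsA A.toList B.toList values) A.toList.length B.toList.length
      = pvDpS A.toList B.toList values A.toList.length B.toList.length := by
    rw [hv]; unfold pvE; rw [if_pos ⟨le_refl _, le_refl _⟩]
  rw [hvv]
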